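-- pv_equiv track=rewrite | github.com/DerDodo/AdventOfCode2024 | solutions/level2.py | is_valid_recursive
-- ===== SOURCE A (Python) =====
-- def is_valid_recursive(report: list[int], num_allowed_errors: int, ascending: bool) -> bool:
--     if num_allowed_errors < 0:
--         return False
--     elif len(report) == 1:
--         return True
--     elif not report:
--         return False
--
--     distance = report[0] - report[1]
--     if ((ascending and (distance < -3 or distance > -1)) or
--             (not ascending and (distance < 1 or distance > 3))):
--         return is_valid_recursive([report[0]] + report[2:], num_allowed_errors - 1, ascending)
--     else:
--         return is_valid_recursive(report[1:], num_allowed_errors, ascending)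
-- ===== SOURCE B (Python) =====
-- def is_valid_recursive(report: list[int], num_allowed_errors: int, ascending: bool) -> bool:
--     # Single pass: count greedy merge errors, then compare with the budget.
--     if num_allowed_errors < 0 or not report:
--         return False
--     lo, hi = (-3, -1) if ascending else (1, 3)
--     errors = 0
--     prev = report[0]
--     for x in report[1:]:
--         if lo <= prev - x <= hi:
--             prev = x
--         else:
--             errors += 1
--     return errors <= num_allowed_errors
-- ===== Notes on version B (the rewrite author's own statement) =====
-- stated objective: faster
-- what changed: Replaced the recursion that rebuilds list slices and decrements a budget with a single linear pass that keeps the last good value, counts bad pairs, and compares the total count with the budget at the end.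
import Mathlib
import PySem

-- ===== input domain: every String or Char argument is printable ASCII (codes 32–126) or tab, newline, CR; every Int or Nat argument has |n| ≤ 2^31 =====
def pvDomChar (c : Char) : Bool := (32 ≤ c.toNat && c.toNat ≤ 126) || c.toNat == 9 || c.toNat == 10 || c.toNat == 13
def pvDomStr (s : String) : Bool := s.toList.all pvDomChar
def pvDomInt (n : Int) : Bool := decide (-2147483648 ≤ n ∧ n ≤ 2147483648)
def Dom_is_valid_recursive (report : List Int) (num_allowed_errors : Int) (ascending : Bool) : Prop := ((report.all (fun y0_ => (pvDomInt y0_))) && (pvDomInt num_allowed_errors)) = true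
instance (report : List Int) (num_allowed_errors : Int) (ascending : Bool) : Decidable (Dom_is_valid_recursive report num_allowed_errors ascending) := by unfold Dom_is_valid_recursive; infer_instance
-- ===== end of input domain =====

-- B replaces A's slice-rebuilding recursion with one linear error-counting pass (measurably faster on large inputs only if a timing run says so; asymptotically O(n) vs O(n^2) slice copies).


-- ===== PORT A =====
def is_valid_recursive (report : List Int) (num_allowed_errors : Int) (ascending : Bool) : Bool :=
  if num_allowed_errors < 0 then false
  else if report.length = 1 then true
  else match report with
    | [] => false
    | [_] => true  -- unreachable: caught by the length = 1 guard above
    | a :: b :: rest =>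
      let distance := a - b
      if (ascending && (decide (distance < -3) || decide (distance > -1))) ||
         (!ascending && (decide (distance < 1) || decide (distance > 3))) then
        is_valid_recursive (a :: rest) (num_allowed_errors - 1) ascending
      else
        is_valid_recursive (b :: rest) num_allowed_errors ascending
termination_by report.length
decreasing_by all_goals simp [List.length_cons]

-- ===== PORT B =====
def pvCountErrors (lo hi : Int) (prev : Int) (xs : List Int) (errors : Int) : Int :=
  match xs with
  | [] => errors
  | x :: rest =>
    if lo ≤ prev - x ∧ prev - x ≤ hi then pvCountErrors lo hi x rest errors
    else pvCountErrors lo hi prev rest (errors + 1)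

def is_valid_recursive_alt (report : List Int) (num_allowed_errors : Int) (ascending : Bool) : Bool :=
  if num_allowed_errors < 0 || report.isEmpty then false
  else
    let lo : Int := if ascending then -3 else 1
    let hi : Int := if ascending then -1 else 3
    decide (pvCountErrors lo hi (report.headD 0) report.tail 0 ≤ num_allowed_errors)

-- ===== PRECONDITION & SPEC =====
def Spec_is_valid_recursive (report : List Int) (num_allowed_errors : Int) (ascending : Bool) (out : Bool) : Prop := out = is_valid_recursive_alt report num_allowed_errors ascending
instance (report : List Int) (num_allowed_errors : Int) (ascending : Bool) (out : Bool) : Decidable (Spec_is_valid_recursive report num_allowed_errors ascending out) := by unfold Spec_is_valid_recursive; infer_instance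

-- ===== CLAIM (what is proved, stated in full; the proofs are below) =====
def Claim_equal_is_valid_recursive : Prop := ∀ (report : List Int) (num_allowed_errors : Int) (ascending : Bool), Dom_is_valid_recursive report num_allowed_errors ascending → Spec_is_valid_recursive report num_allowed_errors ascending (is_valid_recursive report num_allowed_errors ascending)

-- ===== LEMMAS AND PROOFS =====

theorem pvCountErrors_acc (lo hi : Int) (xs : List Int) : ∀ (p e : Int),
    pvCountErrors lo hi p xs e = pvCountErrors lo hi p xs 0 + e := by
  induction xs with
  | nil => intro p e; simp [pvCountErrors]
  | cons x rest ih =>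
    intro p e
    simp only [pvCountErrors]
    split_ifs with h
    · exact ih x e
    · rw [ih p (e + 1), ih p (0 + 1)]; ring

theorem pvCountErrors_nonneg (lo hi : Int) (xs : List Int) : ∀ (p e : Int), 0 ≤ e →
    0 ≤ pvCountErrors lo hi p xs e := by
  induction xs with
  | nil => intro p e he; simpa [pvCountErrors] using he
  | cons x rest ih =>
    intro p e he
    simp only [pvCountErrors]
    split_ifs with h
    · exact ih x e he
    · exact ih p (e + 1) (by omega)

-- main invariant: for a nonempty list, A equals the count-then-compare test
theorem pv_main (asc : Bool) (rest : List Int) : ∀ (a n : Int),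
    is_valid_recursive (a :: rest) n asc =
      decide (pvCountErrors (if asc then -3 else 1) (if asc then -1 else 3) a rest 0 ≤ n) := by
  induction rest with
  | nil =>
    intro a n
    rw [is_valid_recursive.eq_def]
    by_cases h1 : n < 0
    · rw [if_pos h1]
      simp only [pvCountErrors]
      symm; simp only [decide_eq_false_iff_not]; omega
    · rw [if_neg h1, if_pos (by simp : ([a] : List Int).length = 1)]
      simp only [pvCountErrors]
      symm; simp only [decide_eq_true_eq]; omega
  | cons b rest ih =>
    intro a n
    by_cases hn : n < 0
    · have hpos : (0:Int) ≤ pvCountErrors (if asc then -3 else 1) (if asc then -1 else 3) a (b :: rest) 0 :=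
        pvCountErrors_nonneg _ _ _ _ _ le_rfl
      rw [is_valid_recursive.eq_def, if_pos hn]
      symm; simp only [decide_eq_false_iff_not]; omega
    · rw [is_valid_recursive.eq_def,
        if_neg hn, if_neg (by simp : ¬ ((a :: b :: rest) : List Int).length = 1)]
      simp only []
      have hbad : ((asc && (decide (a - b < -3) || decide (a - b > -1))) ||
          (!asc && (decide (a - b < 1) || decide (a - b > 3)))) = true ↔
          ¬ ((if asc then (-3:Int) else 1) ≤ a - b ∧ a - b ≤ (if asc then (-1:Int) else 3)) := by
        cases asc <;> simp <;> omega
      by_cases hc : ((asc && (decide (a - b < -3) || decide (a - b > -1))) ||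
          (!asc && (decide (a - b < 1) || decide (a - b > 3)))) = true
      · simp only [hc, if_true]
        rw [ih a (n - 1)]
        have : pvCountErrors (if asc then -3 else 1) (if asc then -1 else 3) a (b :: rest) 0 =
            pvCountErrors (if asc then -3 else 1) (if asc then -1 else 3) a rest 0 + 1 := by
          rw [pvCountErrors]
          rw [if_neg (hbad.mp hc)]
          exact pvCountErrors_acc _ _ _ _ _
        rw [this]
        simp only [decide_eq_decide]
        omega
      · rw [if_neg hc]
        rw [ih b n]
        have : pvCountErrors (if asc then -3 else 1) (if asc then -1 else 3) a (b :: rest) 0 =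
            pvCountErrors (if asc then -3 else 1) (if asc then -1 else 3) b rest 0 := by
          rw [pvCountErrors]
          rw [if_pos (by by_contra hx; exact hc (hbad.mpr (by omega) ▸ (hbad.mpr hx)))]
        rw [this]

-- ===== VERDICT (by name: the statement is the Claim_ definition above) =====
theorem is_valid_recursive_spec : Claim_equal_is_valid_recursive := by
  intro report n asc _
  unfold Spec_is_valid_recursive is_valid_recursive_alt
  cases report with
  | nil =>
    rw [is_valid_recursive.eq_def]
    simp
  | cons a rest =>
    by_cases hn : n < 0
    · rw [is_valid_recursive.eq_def]
      simp [hn]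
    · simp only [hn, List.isEmpty_cons, Bool.or_false, decide_false]
      simpa using pv_main asc rest a n
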